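-- pv_equiv track=rewrite | github.com/SidneyGomes/CG-Project | OpenImage/filtros.py | sobel
-- ===== SOURCE A (Python) =====
-- def sobel(multiplica_matriz):
--
--     mascara_x = [[-1, -2, -1], [0, 0, 0], [1, 2, 1]]
--     mascara_y = [[-1, 0, 1], [-2, 0, 2], [-1, 0, 1]]
--
--     soma_x = 0
--     soma_y = 0
--
--     for k in range(len(mascara_x)):
--         for l in range(len(mascara_x)):
--             soma_x += (multiplica_matriz[k][l] * mascara_x[k][l])
--             soma_y += (multiplica_matriz[k][l] * mascara_y[k][l])
--
--
--     magnitude = soma_x + soma_y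
--
--     if magnitude > 255:
--         magnitude = 255
--     elif magnitude < 0:
--         magnitude = 0
--
--     return magnitude
-- ===== SOURCE B (Python) =====
-- def sobel(multiplica_matriz):
--     m = multiplica_matriz
--     soma_x = (m[2][0] + 2 * m[2][1] + m[2][2]) - (m[0][0] + 2 * m[0][1] + m[0][2])
--     soma_y = (m[0][2] + 2 * m[1][2] + m[2][2]) - (m[0][0] + 2 * m[1][0] + m[2][0])
--     return max(0, min(255, soma_x + soma_y))
-- ===== Notes on version B (the rewrite author's own statement) =====
-- stated objective: simpler
-- what changed: Replaced the two mask matrices and the nested index loops by one closed-form expression over the nine window cells, and the branch clamp by max/min.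
import Mathlib
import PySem

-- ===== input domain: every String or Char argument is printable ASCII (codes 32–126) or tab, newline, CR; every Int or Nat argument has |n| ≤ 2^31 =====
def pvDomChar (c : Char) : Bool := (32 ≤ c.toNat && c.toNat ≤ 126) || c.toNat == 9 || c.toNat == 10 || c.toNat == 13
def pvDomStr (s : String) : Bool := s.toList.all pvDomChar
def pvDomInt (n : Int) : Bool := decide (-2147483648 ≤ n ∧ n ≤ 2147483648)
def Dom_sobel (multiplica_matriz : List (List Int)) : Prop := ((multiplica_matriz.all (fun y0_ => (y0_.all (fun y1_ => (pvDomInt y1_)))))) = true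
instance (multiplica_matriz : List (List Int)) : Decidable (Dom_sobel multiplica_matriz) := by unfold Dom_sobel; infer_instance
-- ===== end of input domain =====

-- B replaces A's two mask matrices and nested index loops with one closed-form arithmetic expression over the nine window cells and a max/min clamp (objective: simpler; same cost).


-- ===== PORT A =====
def sobel (multiplica_matriz : List (List Int)) : Int :=
  let mascara_x : List (List Int) := [[-1, -2, -1], [0, 0, 0], [1, 2, 1]]
  let mascara_y : List (List Int) := [[-1, 0, 1], [-2, 0, 2], [-1, 0, 1]]
  -- for k in range(len(mascara_x)): for l in range(len(mascara_x)): accumulate (soma_x, soma_y)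
  let s : Int × Int :=
    (PySem.List.pyRange 0 (mascara_x.length) 1).foldl (fun s k =>
      (PySem.List.pyRange 0 (mascara_x.length) 1).foldl (fun s l =>
        let v := (PySem.List.pyGet? ((PySem.List.pyGet? multiplica_matriz k).getD []) l).getD 0
        (s.1 + v * (((PySem.List.pyGet? mascara_x k).getD []) |> (PySem.List.pyGet? · l) |>.getD 0),
         s.2 + v * (((PySem.List.pyGet? mascara_y k).getD []) |> (PySem.List.pyGet? · l) |>.getD 0))) s) (0, 0)
  let magnitude := s.1 + s.2
  if magnitude > 255 then 255 else if magnitude < 0 then 0 else magnitude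

-- ===== PORT B =====
def sobel_alt (multiplica_matriz : List (List Int)) : Int :=
  let g (i j : Int) : Int := (PySem.List.pyGet? ((PySem.List.pyGet? multiplica_matriz i).getD []) j).getD 0
  let soma_x := (g 2 0 + 2 * g 2 1 + g 2 2) - (g 0 0 + 2 * g 0 1 + g 0 2)
  let soma_y := (g 0 2 + 2 * g 1 2 + g 2 2) - (g 0 0 + 2 * g 1 0 + g 2 0)
  max 0 (min 255 (soma_x + soma_y))

-- ===== PRECONDITION & SPEC =====
-- Pre_ excludes exactly the inputs on which Python A raises IndexError: the window
-- must have at least 3 rows and each of the first 3 rows at least 3 columns.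
def Pre_sobel (multiplica_matriz : List (List Int)) : Prop :=
  3 ≤ multiplica_matriz.length ∧ ∀ r ∈ multiplica_matriz.take 3, 3 ≤ r.length
instance (multiplica_matriz : List (List Int)) : Decidable (Pre_sobel multiplica_matriz) := by
  unfold Pre_sobel; infer_instance
def pvWitness_sobel : List (List Int) := [[1, 2, 3], [4, 5, 6], [7, 8, 9]]
def Spec_sobel (multiplica_matriz : List (List Int)) (out : Int) : Prop := out = sobel_alt multiplica_matriz
instance (multiplica_matriz : List (List Int)) (out : Int) : Decidable (Spec_sobel multiplica_matriz out) := by unfold Spec_sobel; infer_instance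

-- ===== CLAIM (what is proved, stated in full; the proofs are below) =====
def Claim_equal_sobel : Prop := ∀ (multiplica_matriz : List (List Int)), Dom_sobel multiplica_matriz → Pre_sobel multiplica_matriz → Spec_sobel multiplica_matriz (sobel multiplica_matriz)

-- ===== LEMMAS AND PROOFS =====

theorem pvGet_zero {α : Type} (x0 x1 x2 : α) (t : List α) :
    PySem.List.pyGet? (x0 :: x1 :: x2 :: t) 0 = some x0 := by
  simp [PySem.List.pyGet?, PySem.List.pyIdx?]
  rw [if_pos (by omega)]
  simp

theorem pvGet_one {α : Type} (x0 x1 x2 : α) (t : List α) :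
    PySem.List.pyGet? (x0 :: x1 :: x2 :: t) 1 = some x1 := by
  simp [PySem.List.pyGet?, PySem.List.pyIdx?]
  rw [if_pos (by omega)]
  simp

theorem pvGet_two {α : Type} (x0 x1 x2 : α) (t : List α) :
    PySem.List.pyGet? (x0 :: x1 :: x2 :: t) 2 = some x2 := by
  simp [PySem.List.pyGet?, PySem.List.pyIdx?]
  rw [if_pos (by omega)]
  simp

set_option maxHeartbeats 2000000 in
theorem sobel_spec : Claim_equal_sobel := by
  intro m _ hpre
  obtain ⟨hlen, hrows⟩ := hpre
  match m, hlen with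
  | r0 :: r1 :: r2 :: rest, _ =>
    have h0 : 3 ≤ r0.length := hrows r0 (by simp)
    have h1 : 3 ≤ r1.length := hrows r1 (by simp)
    have h2 : 3 ≤ r2.length := hrows r2 (by simp)
    match r0, h0 with
    | a0 :: a1 :: a2 :: _, _ =>
    match r1, h1 with
    | b0 :: b1 :: b2 :: _, _ =>
    match r2, h2 with
    | c0 :: c1 :: c2 :: _, _ =>
      have hr : PySem.List.pyRange 0 ((((0:Nat)+1+1+1 : Nat) : Int)) 1 = [0, 1, 2] := by decide
      simp only [Spec_sobel, sobel, sobel_alt, List.length_cons, List.length_nil, hr,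
        List.foldl, pvGet_zero, pvGet_one, pvGet_two, Option.getD_some]
      split_ifs <;> omega
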